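-- pv_equiv track=rewrite | github.com/jamester234/Advent-of-Code-2016 | Days/Day 2 - Bathroom Security/Part 2.py | right
-- ===== SOURCE A (Python) =====
-- def right(string):
--     if string in [i for i in '235678']:
--         return(str(int(string) + 1))
--     elif string == 'A':
--         return('B')
--     elif string == 'B':
--         return('C')
--     else:
--         return('NotAllowed')
-- ===== SOURCE B (Python) =====
-- # Derive the right-neighbor from the AoC day-2 part-2 keypad geometry:
-- # scan each row's adjacent character pairs instead of hardcoding the mapping.
-- _KEYPAD_ROWS = ["1", "234", "56789", "ABC", "D"]
--
-- def right(string):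
--     for row in _KEYPAD_ROWS:
--         for a, b in zip(row, row[1:]):
--             if string == a:
--                 return b
--     return 'NotAllowed'
-- ===== Notes on version B (the rewrite author's own statement) =====
-- stated objective: alternative
-- what changed: B computes the right neighbor from the keypad geometry: it scans the adjacent character pairs of each keypad row ('1','234','56789','ABC','D') and returns the successor within the row, instead of A's digit-membership test with int+1 arithmetic plus an if/elif cascade for letters.
import Mathlib
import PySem

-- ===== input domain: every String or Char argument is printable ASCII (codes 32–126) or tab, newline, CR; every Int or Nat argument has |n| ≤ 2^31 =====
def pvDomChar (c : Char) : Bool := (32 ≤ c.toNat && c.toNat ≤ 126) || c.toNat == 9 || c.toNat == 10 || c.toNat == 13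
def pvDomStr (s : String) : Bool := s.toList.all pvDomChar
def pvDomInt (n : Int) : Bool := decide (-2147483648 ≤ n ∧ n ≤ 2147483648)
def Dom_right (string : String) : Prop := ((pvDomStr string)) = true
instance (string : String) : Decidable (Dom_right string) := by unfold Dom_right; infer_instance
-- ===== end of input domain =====

-- B derives the mapping from the keypad geometry (scan of each row's adjacent pairs)
-- instead of A's membership test + int-arithmetic + if/elif cascade (alternative).

-- ===== PORT A =====
-- [i for i in '235678'] : list of one-character strings
def rightDigits : List String := "235678".toList.map (fun c => String.ofList [c])

def right (string : String) : String :=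
  if rightDigits.contains string then
    -- int(string) never raises here: the guard restricts string to a single digit
    PySem.Int.toStr ((PySem.Int.ofStr? string).getD 0 + 1)
  else if string == "A" then "B"
  else if string == "B" then "C"
  else "NotAllowed"

-- ===== PORT B =====
-- inner loop: for a, b in zip(row, row[1:]): if string == a: return b
def rowScan (s : String) : List Char → Option String
  | a :: b :: rest =>
      if s == String.ofList [a] then some (String.ofList [b]) else rowScan s (b :: rest)
  | _ => none

-- outer loop over the keypad rows, falling through to 'NotAllowed'
def rowsScan (s : String) : List String → String
  | [] => "NotAllowed"
  | r :: rs =>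
      match rowScan s r.toList with
      | some b => b
      | none => rowsScan s rs

def right_alt (string : String) : String :=
  rowsScan string ["1", "234", "56789", "ABC", "D"]

-- ===== PRECONDITION & SPEC =====
def Spec_right (string : String) (out : String) : Prop := out = right_alt string
instance (string : String) (out : String) : Decidable (Spec_right string out) := by unfold Spec_right; infer_instance

-- ===== CLAIM (what is proved, stated in full; the proofs are below) =====
def Claim_equal_right : Prop := ∀ (string : String), Dom_right string → Spec_right string (right string)

-- ===== LEMMAS AND PROOFS =====

-- rightDigits evaluates to this literal list
theorem rightDigits_eq : rightDigits = ["2","3","5","6","7","8"] := by decide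

-- ===== VERDICT (by name: the statement is the Claim_ definition above) =====
theorem right_spec : Claim_equal_right := by
  intro s _
  unfold Spec_right right right_alt
  rw [rightDigits_eq]
  by_cases h2 : s = "2" <;> by_cases h3 : s = "3" <;> by_cases h5 : s = "5" <;>
    by_cases h6 : s = "6" <;> by_cases h7 : s = "7" <;> by_cases h8 : s = "8" <;>
    by_cases hA : s = "A" <;> by_cases hB : s = "B" <;>
    first
      | (subst_vars; decide)
      | (simp [rowsScan, rowScan, h2, h3, h5, h6, h7, h8, hA, hB])
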